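-- pv_equiv track=rewrite | github.com/npanuhin/Advent-of-Code | 2020/Day 14/part2.py | gen_mask
-- ===== SOURCE A (Python) =====
-- def gen_mask(mask, index=0):
--     if index == len(mask):
--         yield ''.join(mask)
--
--     elif mask[index] != 'X':
--         yield from gen_mask(mask, index + 1)
--
--     else:
--         mask[index] = '0'
--         yield from gen_mask(mask, index + 1)
--         mask[index] = '1'
--         yield from gen_mask(mask, index + 1)
--         mask[index] = 'X'
-- ===== SOURCE B (Python) =====
-- def gen_mask(mask, index=0):
--     xs = [i for i in range(index, len(mask)) if mask[i] == 'X']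
--     k = len(xs)
--     for n in range(1 << k):
--         out = list(mask)
--         for j, i in enumerate(xs):
--             out[i] = '1' if (n >> (k - 1 - j)) & 1 else '0'
--         yield ''.join(out)
-- ===== Notes on version B (the rewrite author's own statement) =====
-- stated objective: idiomatic
-- what changed: A enumerates by mutate-recurse-restore backtracking on the shared list; B first collects the X positions, then counts n over range(1<<k) and builds each output string by decoding n's bits (first X = most significant), with no recursion and no mutation of the argument. Pre_ admits 0 <= index <= len(mask) plus negative -len <= index < 0 whose wrapped tail mask[len+index:] has no 'X' (A and B agree there); …
-- outside the precondition, e.g. on gen_mask(['X'], -1): A returns ['0', '1'], B returns ['0', '1', '0', '1']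
import Mathlib
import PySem

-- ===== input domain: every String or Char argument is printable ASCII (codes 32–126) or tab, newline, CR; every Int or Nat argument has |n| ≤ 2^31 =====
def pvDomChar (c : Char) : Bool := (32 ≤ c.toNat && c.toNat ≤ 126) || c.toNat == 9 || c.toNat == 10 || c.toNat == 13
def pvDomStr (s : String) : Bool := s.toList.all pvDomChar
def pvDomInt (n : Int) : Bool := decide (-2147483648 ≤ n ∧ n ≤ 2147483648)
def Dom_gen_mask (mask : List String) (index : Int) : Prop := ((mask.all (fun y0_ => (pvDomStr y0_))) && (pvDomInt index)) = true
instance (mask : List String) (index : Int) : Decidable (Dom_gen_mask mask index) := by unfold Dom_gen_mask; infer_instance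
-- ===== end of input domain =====

-- B replaces A's mutate-recurse-restore backtracking by collecting the X positions once and
-- decoding each counter value's bits into a fresh copy (idiomatic, no mutation of the argument;
-- A temporarily mutates its argument but restores it, so the net side effect is the same).

-- ===== PORT A =====
-- A is a generator; its port returns the list of yielded strings together with the final list
-- state (A mutates `mask` in place and restores it).  `fuel` only makes the recursion total;
-- it is always sufficient at the call site.
def gen_mask_go (mask : List String) (index : Int) : Nat → List String × List String
  | 0 => ([], mask)
  | fuel+1 =>
    if index = (mask.length : Int) then ([PySem.Str.join "" mask], mask)
    else
      match PySem.List.pyGet? mask index with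
      | none => ([], mask)          -- IndexError: excluded by Pre_
      | some c =>
        if c ≠ "X" then gen_mask_go mask (index + 1) fuel
        else
          let r0 := gen_mask_go (PySem.List.pySetD mask index "0") (index + 1) fuel
          let r1 := gen_mask_go (PySem.List.pySetD r0.2 index "1") (index + 1) fuel
          (r0.1 ++ r1.1, PySem.List.pySetD r1.2 index "X")

def gen_mask (mask : List String) (index : Int) : List String :=
  (gen_mask_go mask index ((mask.length - index).toNat + 1)).1

-- ===== PORT B =====
-- '1' if (n >> s) & 1 else '0'
def pvBit (n s : Nat) : String := if (n >>> s) &&& 1 ≠ 0 then "1" else "0"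

def gen_mask_alt (mask : List String) (index : Int) : List String :=
  let xs := (PySem.List.pyRange index (mask.length : Int) 1).filter
              (fun i => PySem.List.pyGetD mask i "" == "X")
  let k := xs.length
  (List.range (2 ^ k)).map (fun n =>
    let out := (PySem.List.enumerate xs 0).foldl
      (fun out ji => PySem.List.pySetD out ji.2 (pvBit n (k - 1 - ji.1.toNat))) mask
    PySem.Str.join "" out)

-- ===== PRECONDITION & SPEC =====
-- Pre_ admits 0 ≤ index ≤ len(mask) and the negative indices -len ≤ index < 0 whose wrapped tail
-- mask[len+index:] contains no 'X' (A and B agree there); it excludes negative indices with an 'X'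
-- in that tail, where wraparound makes both programs double-process a cell and return accidental
-- values that differ, and indices outside [-len, len] where A raises IndexError.
def Pre_gen_mask (mask : List String) (index : Int) : Prop :=
  (0 ≤ index ∧ index ≤ (mask.length : Int)) ∨
  (index < 0 ∧ 0 ≤ index + (mask.length : Int) ∧
    "X" ∉ mask.drop (index + (mask.length : Int)).toNat)
instance (mask : List String) (index : Int) : Decidable (Pre_gen_mask mask index) := by
  unfold Pre_gen_mask; infer_instance

def pvWitness_gen_mask : List String × Int := (["X", "0", "X"], 0)

def Spec_gen_mask (mask : List String) (index : Int) (out : List String) : Prop :=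
  out = gen_mask_alt mask index
instance (mask : List String) (index : Int) (out : List String) : Decidable (Spec_gen_mask mask index out) := by
  unfold Spec_gen_mask; infer_instance

-- ===== CLAIM (what is proved, stated in full; the proofs are below) =====
def Claim_equal_gen_mask : Prop := ∀ (mask : List String) (index : Int),
  Dom_gen_mask mask index → Pre_gen_mask mask index →
  Spec_gen_mask mask index (gen_mask mask index)

-- ===== LEMMAS AND PROOFS =====

-- Common recursive characterisation (proof-only): the list of completions of `mask` from
-- position `i` on, branching at each X.
def specN (mask : List String) (i : Nat) : List String :=
  if h : i < mask.length then
    if mask[i] ≠ "X" then specN mask (i + 1)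
    else specN (mask.set i "0") (i + 1) ++ specN (mask.set i "1") (i + 1)
  else [PySem.Str.join "" mask]
termination_by mask.length - i
decreasing_by all_goals (first | omega | (simp only [List.length_set]; omega))

theorem gen_mask_go_eq (fuel : Nat) : ∀ (mask : List String) (i : Int),
    0 ≤ i → i ≤ (mask.length : Int) → mask.length - i.toNat < fuel →
    gen_mask_go mask i fuel = (specN mask i.toNat, mask) := by
  induction fuel with
  | zero => intro mask i h0 h1 hf; omega
  | succ fuel ih =>
    intro mask i h0 h1 hf
    by_cases hi : i = (mask.length : Int)
    · rw [specN]
      simp [gen_mask_go, hi]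
    · have hlt : i.toNat < mask.length := by omega
      have hget := PySem.List.pyGet?_eq_some_getElem (xs := mask) (i := i) h0 (by omega)
      have hsucc : (i + 1).toNat = i.toNat + 1 := by omega
      rw [specN]
      by_cases hx : mask[i.toNat] = "X"
      · have hset : ∀ (xs : List String) (v : String),
            PySem.List.pySetD xs i v = xs.set i.toNat v :=
          fun xs v => PySem.List.pySetD_of_nonneg xs v h0
        have hA := ih (mask.set i.toNat "0") (i + 1) (by omega)
          (by simp; omega) (by simp; omega)
        have hB := ih (mask.set i.toNat "1") (i + 1) (by omega)
          (by simp; omega) (by simp; omega)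
        rw [hsucc] at hA hB
        have hres : mask.set i.toNat "X" = mask := by
          rw [← hx]; exact List.set_getElem_self hlt
        simp [gen_mask_go, if_neg hi, hget, hset, hx, hA, hB, dif_pos hlt,
          List.set_set, hres]
      · have hA := ih mask (i + 1) (by omega) (by omega) (by omega)
        rw [hsucc] at hA
        simp [gen_mask_go, if_neg hi, hget, hx, hA, dif_pos hlt]

-- bit-decoding facts for pvBit
theorem pvBit_high (n k : Nat) (h : n < 2 ^ k) : pvBit n k = "0" := by
  simp [pvBit, Nat.shiftRight_eq_div_pow, Nat.div_eq_of_lt h]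

theorem pvBit_high' (n k : Nat) (h : n < 2 ^ k) : pvBit (2 ^ k + n) k = "1" := by
  unfold pvBit
  rw [Nat.shiftRight_eq_div_pow, Nat.add_comm, Nat.add_div_right _ (Nat.two_pow_pos k),
    Nat.div_eq_of_lt h]
  decide

theorem pvBit_low (n k s : Nat) (h : s < k) : pvBit (2 ^ k + n) s = pvBit n s := by
  unfold pvBit
  rw [Nat.shiftRight_eq_div_pow, Nat.shiftRight_eq_div_pow, Nat.and_one_is_mod, Nat.and_one_is_mod]
  have hks : s + (k - s - 1) + 1 = k := by omega
  have hk : 2 ^ k = 2 ^ s * (2 * 2 ^ (k - s - 1)) := by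
    conv_lhs => rw [← hks]
    ring
  rw [hk, Nat.mul_add_div (Nat.two_pow_pos s)]
  have hc : (2 * 2 ^ (k - s - 1) + n / 2 ^ s) % 2 = (n / 2 ^ s) % 2 := by
    generalize 2 ^ (k - s - 1) = a
    generalize n / 2 ^ s = b
    omega
  rw [hc]

-- proof-only restatement of B's body: the map over the counter for a given X-position list
def altSpec (mask : List String) (xs : List Int) : List String :=
  (List.range (2 ^ xs.length)).map (fun n =>
    PySem.Str.join "" ((PySem.List.enumerate xs 0).foldl
      (fun out ji => PySem.List.pySetD out ji.2 (pvBit n (xs.length - 1 - ji.1.toNat))) mask))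

theorem gen_mask_alt_eq_altSpec (mask : List String) (i : Int) :
    gen_mask_alt mask i =
      altSpec mask ((PySem.List.pyRange i (mask.length : Int) 1).filter
        (fun j => PySem.List.pyGetD mask j "" == "X")) := rfl

-- shifting the enumeration start of B's inner write-loop
theorem foldl_enum_shift : ∀ (xs : List Int) (F : Nat → Int → List String → List String)
    (s : Nat) (out : List String),
    (PySem.List.enumerate xs (s : Int)).foldl (fun out ji => F ji.1.toNat ji.2 out) out
      = (PySem.List.enumerate xs 0).foldl (fun out ji => F (s + ji.1.toNat) ji.2 out) out := by
  intro xs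
  induction xs with
  | nil => intro F s out; rfl
  | cons x xs ih =>
    intro F s out
    rw [PySem.List.enumerate_cons, PySem.List.enumerate_cons]
    simp only [List.foldl_cons, Int.toNat_natCast, Int.toNat_zero, Nat.add_zero]
    rw [show ((s : Int) + 1) = ((s + 1 : Nat) : Int) by push_cast; ring, ih,
      show ((0 : Int) + 1) = ((1 : Nat) : Int) by norm_num,
      ih (fun j v out => F (s + j) v out) 1]
    apply PySem.List.foldl_congr_mem
    intro acc p _
    have : s + 1 + p.1.toNat = s + (1 + p.1.toNat) := by omega
    rw [this]

theorem altSpec_nil (mask : List String) : altSpec mask [] = [PySem.Str.join "" mask] := rfl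

theorem altSpec_cons (mask : List String) (i : Int) (xs' : List Int)
    (h0 : 0 ≤ i) :
    altSpec mask (i :: xs')
      = altSpec (mask.set i.toNat "0") xs' ++ altSpec (mask.set i.toNat "1") xs' := by
  unfold altSpec
  simp only [List.length_cons]
  rw [show 2 ^ (xs'.length + 1) = 2 ^ xs'.length + 2 ^ xs'.length by ring,
    List.range_add, List.map_append, List.map_map]
  have hsub : ∀ j : Nat, xs'.length - (1 + j) = xs'.length - 1 - j := by omega
  congr 1
  · apply List.map_congr_left
    intro n hn
    have hn' : n < 2 ^ xs'.length := List.mem_range.mp hn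
    rw [PySem.List.enumerate_cons]
    simp only [List.foldl_cons, Int.toNat_zero, Nat.add_sub_cancel, Nat.sub_zero]
    rw [pvBit_high n xs'.length hn', PySem.List.pySetD_of_nonneg mask "0" h0,
      show ((0 : Int) + 1) = ((1 : Nat) : Int) by norm_num,
      foldl_enum_shift xs' (fun j v out => PySem.List.pySetD out v (pvBit n (xs'.length - j))) 1]
    simp only [hsub]
  · apply List.map_congr_left
    intro n hn
    have hn' : n < 2 ^ xs'.length := List.mem_range.mp hn
    rw [PySem.List.enumerate_cons]
    simp only [Function.comp_apply, List.foldl_cons, Int.toNat_zero, Nat.add_sub_cancel,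
      Nat.sub_zero]
    rw [pvBit_high' n xs'.length hn', PySem.List.pySetD_of_nonneg mask "1" h0,
      show ((0 : Int) + 1) = ((1 : Nat) : Int) by norm_num,
      foldl_enum_shift xs'
        (fun j v out => PySem.List.pySetD out v (pvBit (2 ^ xs'.length + n) (xs'.length - j))) 1]
    congr 1
    apply PySem.List.foldl_congr_mem
    intro acc p hp
    have hlen : 0 < xs'.length := by
      have hne : PySem.List.enumerate xs' 0 ≠ [] := fun hh => by rw [hh] at hp; simp at hp
      have h1 := List.length_pos_of_ne_nil hne
      rwa [PySem.List.length_enumerate] at h1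
    rw [hsub p.1.toNat, pvBit_low n xs'.length (xs'.length - 1 - p.1.toNat) (by omega)]

theorem gen_mask_alt_eq_aux : ∀ (d : Nat) (mask : List String) (i : Int),
    0 ≤ i → i ≤ (mask.length : Int) → mask.length - i.toNat ≤ d →
    gen_mask_alt mask i = specN mask i.toNat := by
  intro d
  induction d with
  | zero =>
    intro mask i h0 h1 hd
    rw [specN, gen_mask_alt_eq_altSpec, PySem.List.pyRange_one_eq_nil (by omega)]
    simp only [List.filter_nil, altSpec_nil]
    rw [dif_neg (by omega)]
  | succ d ih =>
    intro mask i h0 h1 hd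
    by_cases he : i = (mask.length : Int)
    · rw [specN, gen_mask_alt_eq_altSpec, PySem.List.pyRange_one_eq_nil (by omega)]
      simp only [List.filter_nil, altSpec_nil]
      rw [dif_neg (by omega)]
    · have hlt : i.toNat < mask.length := by omega
      have hsucc : (i + 1).toNat = i.toNat + 1 := by omega
      have hget : PySem.List.pyGetD mask i "" = mask[i.toNat] :=
        PySem.List.pyGetD_eq_getElem mask "" h0 (by omega)
      have hfilter : ∀ (c : String),
          (PySem.List.pyRange (i + 1) (((mask.set i.toNat c).length : Nat) : Int) 1).filter
              (fun j => PySem.List.pyGetD (mask.set i.toNat c) j "" == "X")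
            = (PySem.List.pyRange (i + 1) (mask.length : Int) 1).filter
              (fun j => PySem.List.pyGetD mask j "" == "X") := by
        intro c
        rw [List.length_set]
        apply List.filter_congr
        intro j hj
        have hj' : i + 1 ≤ j ∧ j < (mask.length : Int) := PySem.List.mem_pyRange_one.mp hj
        rw [PySem.List.pyGetD_eq_getElem (mask.set i.toNat c) "" (by omega) (by simp; omega),
          PySem.List.pyGetD_eq_getElem mask "" (by omega) (by omega),
          List.getElem_set_ne (by omega)]
      rw [specN, gen_mask_alt_eq_altSpec, PySem.List.pyRange_one_cons (by omega)]
      simp only [List.filter_cons, hget]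
      by_cases hx : mask[i.toNat] = "X"
      · rw [hx]
        simp only [BEq.rfl, if_true]
        rw [altSpec_cons mask i _ h0, dif_pos hlt, if_neg (by simp [hx])]
        have e0 := ih (mask.set i.toNat "0") (i + 1) (by omega)
          (by simp; omega) (by simp; omega)
        have e1 := ih (mask.set i.toNat "1") (i + 1) (by omega)
          (by simp; omega) (by simp; omega)
        rw [gen_mask_alt_eq_altSpec, hfilter "0", hsucc] at e0
        rw [gen_mask_alt_eq_altSpec, hfilter "1", hsucc] at e1
        rw [e0, e1]
      · rw [if_neg (by simp [hx]), dif_pos hlt, if_pos hx]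
        have e := ih mask (i + 1) (by omega) (by omega) (by omega)
        rw [gen_mask_alt_eq_altSpec, hsucc] at e
        exact e

theorem gen_mask_alt_eq (mask : List String) (i : Int)
    (h0 : 0 ≤ i) (h1 : i ≤ (mask.length : Int)) :
    gen_mask_alt mask i = specN mask i.toNat :=
  gen_mask_alt_eq_aux (mask.length - i.toNat) mask i h0 h1 (le_refl _)

-- position j ≥ d carries no "X" when the dropped tail does not
theorem noX_getElem (mask : List String) (d j : Nat) (hd : d ≤ j) (hj : j < mask.length)
    (h : "X" ∉ mask.drop d) : mask[j] ≠ "X" := by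
  intro hx
  apply h
  have hjd : j - d < (mask.drop d).length := by simp; omega
  have : (mask.drop d)[j - d] = mask[j] := by
    rw [List.getElem_drop]
    congr 1
    omega
  rw [← hx, ← this]
  exact List.getElem_mem hjd

-- A on an admitted negative index: the wrapped prefix holds no "X", so the scan just advances to 0
theorem gen_mask_go_neg : ∀ (fuel : Nat) (mask : List String) (i : Int),
    i < 0 → 0 ≤ i + (mask.length : Int) →
    "X" ∉ mask.drop (i + (mask.length : Int)).toNat →
    mask.length + (-i).toNat < fuel →
    gen_mask_go mask i fuel = (specN mask 0, mask) := by
  intro fuel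
  induction fuel with
  | zero => intro mask i h0 h1 hX hf; omega
  | succ fuel ih =>
    intro mask i h0 h1 hX hf
    have hne : i ≠ (mask.length : Int) := by omega
    have hget0 : PySem.List.pyGet? mask i = mask[(i + (mask.length : Int)).toNat]? := by
      rw [show i = -((((-i).toNat : Nat)) : Int) by omega,
        PySem.List.pyGet?_neg_natCast mask (-i).toNat (by omega) (by omega)]
      congr 1
      omega
    have hget : PySem.List.pyGet? mask i = some mask[(i + (mask.length : Int)).toNat] := by
      rw [hget0, List.getElem?_eq_getElem (by omega)]
    have hx : mask[(i + (mask.length : Int)).toNat] ≠ "X" :=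
      noX_getElem mask _ _ (le_refl _) (by omega) hX
    have hrec : gen_mask_go mask (i + 1) fuel = (specN mask 0, mask) := by
      by_cases hi1 : i + 1 = 0
      · rw [hi1]
        have := gen_mask_go_eq fuel mask 0 (le_refl _) (by omega) (by omega)
        simpa using this
      · apply ih mask (i + 1) (by omega) (by omega) _ (by omega)
        intro hmem
        apply hX
        apply List.mem_of_mem_drop (i := 1)
        rw [List.drop_drop]
        rw [show (i + (mask.length : Int)).toNat + 1 = (i + 1 + (mask.length : Int)).toNat by omega]
        exact hmem
    simp [gen_mask_go, if_neg hne, hget, hx, hrec]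

-- B on an admitted negative index: the negative part of the range contributes no X position
theorem gen_mask_alt_neg (mask : List String) (i : Int)
    (h0 : i < 0) (h1 : 0 ≤ i + (mask.length : Int))
    (hX : "X" ∉ mask.drop (i + (mask.length : Int)).toNat) :
    gen_mask_alt mask i = specN mask 0 := by
  rw [gen_mask_alt_eq_altSpec,
    PySem.List.pyRange_one_append i 0 (mask.length : Int) (by omega) (by omega),
    List.filter_append]
  have hnil : (PySem.List.pyRange i 0 1).filter
      (fun j => PySem.List.pyGetD mask j "" == "X") = [] := by
    apply List.filter_eq_nil_iff.mpr
    intro j hj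
    have hj' : i ≤ j ∧ j < 0 := PySem.List.mem_pyRange_one.mp hj
    have hg0 : PySem.List.pyGet? mask j = mask[(j + (mask.length : Int)).toNat]? := by
      rw [show j = -((((-j).toNat : Nat)) : Int) by omega,
        PySem.List.pyGet?_neg_natCast mask (-j).toNat (by omega) (by omega)]
      congr 1
      omega
    have hg : PySem.List.pyGet? mask j = some mask[(j + (mask.length : Int)).toNat] := by
      rw [hg0, List.getElem?_eq_getElem (by omega)]
    have hxj : mask[(j + (mask.length : Int)).toNat] ≠ "X" :=
      noX_getElem mask _ _ (by omega) (by omega) hX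
    simp [PySem.List.pyGetD, hg, hxj]
  rw [hnil, List.nil_append]
  have h := gen_mask_alt_eq mask 0 (le_refl _) (by omega)
  rw [gen_mask_alt_eq_altSpec] at h
  simpa using h

-- ===== VERDICT (by name: the statement is the Claim_ definition above) =====
theorem gen_mask_spec : Claim_equal_gen_mask := by
  intro mask index _ hpre
  unfold Spec_gen_mask gen_mask
  rcases hpre with ⟨h0, h1⟩ | ⟨h0, h1, hX⟩
  · rw [gen_mask_go_eq _ mask index h0 h1 (by omega), gen_mask_alt_eq mask index h0 h1]
  · rw [gen_mask_go_neg _ mask index h0 h1 hX (by omega), gen_mask_alt_neg mask index h0 h1 hX]
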